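-- pv_equiv track=rewrite | github.com/vikash8507/AdvancedDSA | Hashing/count_duplicate_paris.py | count_paris
-- ===== SOURCE A (Python) =====
-- def count_paris(lst):
--     answer = 0
--     dct = {}
--     for item in lst:
--         current_count = dct.get(item, 0)
--         answer += current_count
--         dct.update({item: current_count + 1})
--     return answer
-- ===== SOURCE B (Python) =====
-- def count_paris(lst):
--     counts = {}
--     for item in lst:
--         counts[item] = counts.get(item, 0) + 1
--     total = 0
--     for c in counts.values():
--         total += c * (c - 1) // 2
--     return total
-- ===== Notes on version B (the rewrite author's own statement) =====
-- stated objective: simpler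
-- what changed: B replaces A's incremental pair accumulation inside the counting loop by two separate passes: build a full frequency table, then sum the closed form c*(c-1)//2 over the distinct counts.
import Mathlib
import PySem

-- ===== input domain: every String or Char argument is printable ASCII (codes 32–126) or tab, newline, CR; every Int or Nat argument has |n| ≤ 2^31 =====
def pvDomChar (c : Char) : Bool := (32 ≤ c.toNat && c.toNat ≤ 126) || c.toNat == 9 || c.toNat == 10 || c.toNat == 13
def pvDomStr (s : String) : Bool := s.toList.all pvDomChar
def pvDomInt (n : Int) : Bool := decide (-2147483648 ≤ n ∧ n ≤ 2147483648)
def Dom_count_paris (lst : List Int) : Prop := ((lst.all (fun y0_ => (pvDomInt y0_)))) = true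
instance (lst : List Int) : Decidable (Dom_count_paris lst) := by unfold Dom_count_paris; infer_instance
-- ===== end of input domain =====

-- B is a simpler decomposition of the same task: a frequency table built first, then c*(c-1)//2 summed per distinct count (no speed claim).

-- ===== PORT A =====
-- answer/dct loop: answer += dct.get(item, 0); dct.update({item: current_count + 1})
def count_paris (lst : List Int) : Int :=
  (lst.foldl
    (fun s item =>
      let current_count := s.2.getD item 0
      (s.1 + current_count, s.2.insert item (current_count + 1)))
    ((0 : Int), (PySem.Dict.empty : PySem.Dict Int Int))).1

-- ===== PORT B =====
-- first pass: counts[item] = counts.get(item, 0) + 1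
def count_paris_altCounts (lst : List Int) : PySem.Dict Int Int :=
  lst.foldl (fun d item => d.insert item (d.getD item 0 + 1)) PySem.Dict.empty

-- second pass: total += c * (c - 1) // 2 over counts.values()
def count_paris_alt (lst : List Int) : Int :=
  (count_paris_altCounts lst).values.foldl
    (fun total c => total + PySem.Int.floordiv (c * (c - 1)) 2) 0

-- ===== PRECONDITION & SPEC =====
def Spec_count_paris (lst : List Int) (out : Int) : Prop := out = count_paris_alt lst
instance (lst : List Int) (out : Int) : Decidable (Spec_count_paris lst out) := by unfold Spec_count_paris; infer_instance

-- ===== CLAIM (what is proved, stated in full; the proofs are below) =====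
def Claim_equal_count_paris : Prop := ∀ (lst : List Int), Dom_count_paris lst → Spec_count_paris lst (count_paris lst)

-- ===== LEMMAS AND PROOFS =====

def pvF (c : Int) : Int := PySem.Int.floordiv (c * (c - 1)) 2

theorem pvF_succ (c : Int) : pvF (c + 1) = pvF c + c := by
  unfold pvF
  rw [PySem.Int.floordiv_eq_ediv_of_pos (by norm_num), PySem.Int.floordiv_eq_ediv_of_pos (by norm_num)]
  obtain ⟨k, hk⟩ : Even (c * (c - 1)) := by
    have h := Int.even_mul_succ_self (c - 1)
    have : (c - 1) * (c - 1 + 1) = c * (c - 1) := by ring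
    rwa [this] at h
  have h2 : (c + 1) * (c + 1 - 1) = c * (c - 1) + 2 * c := by ring
  omega

-- sum of pvF over the values of a dict, via its items list
def pvSumF (l : List (Int × Int)) : Int := (l.map (fun p => pvF p.2)).sum

theorem pvSum_map_update (l : List Int) (x : Int) (g g' : Int → Int)
    (hnd : l.Nodup) (hx : x ∈ l) (h : ∀ k ∈ l, k ≠ x → g' k = g k) :
    ((l.map g').sum : Int) = (l.map g).sum + (g' x - g x) := by
  induction l with
  | nil => cases hx
  | cons a t ih =>
    rcases List.mem_cons.mp hx with rfl | hxt
    · have hnot : x ∉ t := (List.nodup_cons.mp hnd).1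
      have : t.map g' = t.map g := by
        apply List.map_congr_left
        intro k hk
        exact h k (List.mem_cons_of_mem _ hk) (fun hkx => hnot (hkx ▸ hk))
      simp [this]; ring
    · have ha : a ≠ x := fun hax => (List.nodup_cons.mp hnd).1 (hax ▸ hxt)
      have := ih (List.nodup_cons.mp hnd).2 hxt
        (fun k hk hkx => h k (List.mem_cons_of_mem _ hk) hkx)
      simp [h a (List.mem_cons_self) ha, this]; ring

theorem pvSumF_insert (d : PySem.Dict Int Int) (x : Int) (hnd : d.keys.Nodup) :
    pvSumF ((d.insert x (d.getD x 0 + 1)).items) = pvSumF d.items + d.getD x 0 := by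
  by_cases hc : d.contains x = true
  · have hkeys := PySem.Dict.keys_insert_of_contains d (d.getD x 0 + 1) hc
    have hx : x ∈ d.keys := (PySem.Dict.contains_iff_mem_keys d x).mp hc
    have hnd' : (d.insert x (d.getD x 0 + 1)).keys.Nodup := by rw [hkeys]; exact hnd
    unfold pvSumF
    rw [PySem.Dict.items_eq_map_keys _ hnd' 0, PySem.Dict.items_eq_map_keys d hnd 0,
      hkeys, List.map_map, List.map_map]
    have := pvSum_map_update d.keys x
      (fun k => pvF (d.getD k 0))
      (fun k => pvF ((d.insert x (d.getD x 0 + 1)).getD k 0))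
      hnd hx
      (fun k _ hkx => by simp only []; rw [PySem.Dict.getD_insert_of_ne d _ _ hkx])
    simp only [Function.comp_def] at this ⊢
    rw [this, PySem.Dict.getD_insert_self, pvF_succ]
    ring
  · have hc' : d.contains x = false := by simpa using hc
    rw [PySem.Dict.items_insert_of_not_contains d _ hc']
    unfold pvSumF
    rw [PySem.Dict.getD_of_not_contains d 0 hc']
    simp [pvF]

theorem pv_loop_inv (lst : List Int) (ans : Int) (d : PySem.Dict Int Int)
    (hnd : d.keys.Nodup) :
    (lst.foldl
      (fun s item =>
        let current_count := s.2.getD item 0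
        (s.1 + current_count, s.2.insert item (current_count + 1)))
      (ans, d)).1
    = ans + pvSumF ((lst.foldl (fun d item => d.insert item (d.getD item 0 + 1)) d).items)
          - pvSumF d.items := by
  induction lst generalizing ans d with
  | nil => simp
  | cons x t ih =>
    simp only [List.foldl_cons]
    rw [ih (ans + d.getD x 0) _ (PySem.Dict.nodup_keys_insert d x _ hnd),
      pvSumF_insert d x hnd]
    ring

theorem pv_foldl_add_f (l : List Int) (s : Int) :
    l.foldl (fun total c => total + PySem.Int.floordiv (c * (c - 1)) 2) s
      = s + (l.map pvF).sum := by
  induction l generalizing s with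
  | nil => simp
  | cons a t ih =>
    simp only [List.foldl_cons, List.map_cons, List.sum_cons]
    rw [ih]; unfold pvF; ring

-- ===== VERDICT (by name: the statement is the Claim_ definition above) =====
theorem count_paris_spec : Claim_equal_count_paris := by
  intro lst _
  unfold Spec_count_paris count_paris count_paris_alt count_paris_altCounts
  rw [pv_loop_inv lst 0 PySem.Dict.empty PySem.Dict.nodup_keys_empty,
    pv_foldl_add_f]
  simp only [PySem.Dict.values, pvSumF, List.map_map, Function.comp_def]
  simp [PySem.Dict.empty]
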